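-- pv_equiv track=rewrite | github.com/dataiku/dss-plugin-nlp-preparation | python-lib/spell_checker/dataframe_helpers.py | create_new_column_name
-- ===== SOURCE A (Python) =====
-- def create_new_column_name(col_name, suffix, dataset_columns):
--     """
--     input:
--         - col_name: column name of the dataset df
--         - suffix: suffix to be appended to col_name
--         - dataset_columns: list of all columns of dataset
--     output:
--         - new column name with suffix that is not in the columns of the dataset
--     To ensure the output column name is not in the dataset, we append a number to col_name + "_" + suffix if needed
--     """
--     if col_name + "_" + suffix in dataset_columns:
--         i = 0
--         col_new_name = col_name + "_" + suffix + "_" + str(i)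
--
--         while col_new_name in dataset_columns:
--             i += 1
--             col_new_name = col_name + "_" + suffix + "_" + str(i)
--         return col_new_name
--     else:
--         return col_name + "_" + suffix
-- ===== SOURCE B (Python) =====
-- def _canonical_index(rest):
--     """Return k if rest is exactly the canonical decimal str(k) of a
--     non-negative integer k (digits only, no leading zeros), else None."""
--     value = 0
--     for ch in rest:
--         if not ('0' <= ch <= '9'):
--             return None
--         value = 10 * value + (ord(ch) - 48)
--     if str(value) == rest:
--         return value
--     return None
--
--
-- def create_new_column_name(col_name, suffix, dataset_columns):
--     """
--     Inverted algorithm: instead of probing candidate names one by one against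
--     the column list, scan the columns ONCE, extract the set of numeric indices
--     already used after the prefix base + "_", and return the name built from
--     the minimum excludant (mex) of that index set.
--     """
--     base = col_name + "_" + suffix
--     if base not in dataset_columns:
--         return base
--     prefix = base + "_"
--     used = set()
--     for col in dataset_columns:
--         if col.startswith(prefix):
--             k = _canonical_index(col[len(prefix):])
--             if k is not None:
--                 used.add(k)
--     i = 0
--     while i in used:
--         i += 1
--     return prefix + str(i)
-- ===== Notes on version B (the rewrite author's own statement) =====
-- stated objective: alternative
-- what changed: Instead of A's probe loop that tries base, base_0, base_1, ... against the column list until one is missing, B scans the columns once, parses each column of the form prefix+canonical-decimal to collect the set of numeric indices already in use, and returns the name built from the minimum excludant (mex) of that set; correctness rests on prefix+str(k) being in the columns iff k is collected.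
import Mathlib
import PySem

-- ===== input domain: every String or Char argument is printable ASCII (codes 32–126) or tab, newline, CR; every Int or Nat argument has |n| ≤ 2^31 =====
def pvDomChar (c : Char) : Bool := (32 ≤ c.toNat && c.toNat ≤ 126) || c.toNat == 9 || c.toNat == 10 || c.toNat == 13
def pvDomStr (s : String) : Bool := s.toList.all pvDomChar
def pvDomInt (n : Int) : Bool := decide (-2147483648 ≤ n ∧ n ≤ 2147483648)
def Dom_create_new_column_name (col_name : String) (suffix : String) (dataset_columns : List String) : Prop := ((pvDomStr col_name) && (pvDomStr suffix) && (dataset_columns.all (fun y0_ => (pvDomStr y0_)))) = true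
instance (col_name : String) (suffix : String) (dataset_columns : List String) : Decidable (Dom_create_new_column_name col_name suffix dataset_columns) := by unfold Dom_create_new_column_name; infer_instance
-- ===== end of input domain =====

-- B replaces A's candidate-probing loop by a single scan of the columns that parses the numeric
-- suffixes already used and returns the mex of that index set; objective: alternative algorithm.

-- ===== PORT A =====
-- A's while-loop: i starts at 0, candidate recomputed each turn.  The fuel
-- dataset_columns.length + 1 is a pure totality bound: the loop exits before exhausting it
-- (at most dataset_columns.length distinct numbered candidates can be present in the list).
def pvALoop (base : String) (cols : List String) : Int → Nat → String
  | i, 0 => base ++ "_" ++ PySem.Int.toStr i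
  | i, fuel+1 =>
    let col_new_name := base ++ "_" ++ PySem.Int.toStr i
    if col_new_name ∈ cols then pvALoop base cols (i + 1) fuel else col_new_name

def create_new_column_name (col_name : String) (suffix : String) (dataset_columns : List String) : String :=
  if col_name ++ "_" ++ suffix ∈ dataset_columns then
    pvALoop (col_name ++ "_" ++ suffix) dataset_columns 0 (dataset_columns.length + 1)
  else
    col_name ++ "_" ++ suffix

-- ===== PORT B =====
-- Source B helper _canonical_index: the for-loop with early return becomes structural recursion;
-- then the canonicity check str(value) == rest.
def pvCanonLoop : List Char → Int → Option Int
  | [], value => some value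
  | ch :: rest, value =>
    if '0' ≤ ch ∧ ch ≤ '9' then pvCanonLoop rest (10 * value + ((ch.toNat : Int) - 48))
    else none

def pvCanonicalIndex (rest : List Char) : Option Int :=
  match pvCanonLoop rest 0 with
  | some value => if PySem.Int.toChars value = rest then some value else none
  | none => none

-- Source B: used = set(); for col in dataset_columns: if col.startswith(prefix): k = _canonical_index(col[len(prefix):]); if k is not None: used.add(k)
def pvUsed (pre : String) (cols : List String) : PySem.Set Int :=
  cols.foldl (fun used col =>
    if PySem.Chars.startswith col.toList pre.toList then
      match pvCanonicalIndex ((PySem.List.slice col.toList (some (PySem.Str.len pre)) none)) with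
      | some k => used.add k
      | none => used
    else used) PySem.Set.empty

-- Source B: i = 0; while i in used: i += 1.  Fuel cols.length + 1 is a totality bound only:
-- used holds at most cols.length integers, so the loop exits before exhausting it.
def pvMexLoop (used : PySem.Set Int) : Int → Nat → Int
  | i, 0 => i
  | i, fuel+1 => if used.contains i then pvMexLoop used (i + 1) fuel else i

def create_new_column_name_alt (col_name : String) (suffix : String) (dataset_columns : List String) : String :=
  let base := col_name ++ "_" ++ suffix
  if ¬ (base ∈ dataset_columns) then base
  else
    let pre := base ++ "_"
    let used := pvUsed pre dataset_columns
    let i := pvMexLoop used 0 (dataset_columns.length + 1)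
    pre ++ PySem.Int.toStr i

-- ===== PRECONDITION & SPEC =====
def Spec_create_new_column_name (col_name : String) (suffix : String) (dataset_columns : List String) (out : String) : Prop := out = create_new_column_name_alt col_name suffix dataset_columns
instance (col_name : String) (suffix : String) (dataset_columns : List String) (out : String) : Decidable (Spec_create_new_column_name col_name suffix dataset_columns out) := by unfold Spec_create_new_column_name; infer_instance

-- ===== CLAIM (what is proved, stated in full; the proofs are below) =====
def Claim_equal_create_new_column_name : Prop := ∀ (col_name : String) (suffix : String) (dataset_columns : List String), Dom_create_new_column_name col_name suffix dataset_columns → Spec_create_new_column_name col_name suffix dataset_columns (create_new_column_name col_name suffix dataset_columns)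

-- ===== LEMMAS AND PROOFS =====

-- digit bounds from the char comparisons of Source B
theorem pv_digit_bounds {c : Char} (h1 : '0' ≤ c) (h2 : c ≤ '9') : 48 ≤ c.toNat ∧ c.toNat ≤ 57 := by
  rw [Char.le_def] at h1 h2
  rw [UInt32.le_iff_toNat_le] at h1 h2
  exact ⟨h1, h2⟩

-- pvCanonLoop is the Nat decimal fold, on all-digit input
def pvDec (l : List Char) : Nat := l.foldl (fun a c => 10 * a + (c.toNat - 48)) 0

theorem pv_canonLoop_digits : ∀ (l : List Char) (v : Nat),
    (∀ c ∈ l, '0' ≤ c ∧ c ≤ '9') →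
    pvCanonLoop l (v : Int) = some ((l.foldl (fun a c => 10 * a + (c.toNat - 48)) v : Nat) : Int) := by
  intro l
  induction l with
  | nil => intro v _; simp [pvCanonLoop]
  | cons c l ih =>
    intro v h
    have hd := h c (List.mem_cons_self ..)
    have hb := pv_digit_bounds hd.1 hd.2
    simp only [pvCanonLoop, if_pos hd, List.foldl_cons]
    have hcast : 10 * (v : Int) + ((c.toNat : Int) - 48) = ((10 * v + (c.toNat - 48) : Nat) : Int) := by
      push_cast [Nat.cast_sub hb.1]; ring
    rw [hcast, ih (10 * v + (c.toNat - 48)) (fun c hc => h c (List.mem_cons_of_mem _ hc))]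

theorem pv_canonLoop_nonneg : ∀ (l : List Char) (v r : Int),
    0 ≤ v → pvCanonLoop l v = some r → 0 ≤ r := by
  intro l
  induction l with
  | nil => intro v r hv h; simp [pvCanonLoop] at h; omega
  | cons c l ih =>
    intro v r hv h
    simp only [pvCanonLoop] at h
    split_ifs at h with hd
    · have hb := pv_digit_bounds hd.1 hd.2
      exact ih _ r (by omega) h

-- Nat.toDigits 10 produces digit chars
theorem pv_digitChar_digit (d : Nat) (h : d < 10) : '0' ≤ Nat.digitChar d ∧ Nat.digitChar d ≤ '9' := by
  interval_cases d <;> exact ⟨by decide, by decide⟩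

theorem pv_toDigitsCore_digits (f : Nat) : ∀ (n : Nat) (l : List Char),
    (∀ c ∈ l, '0' ≤ c ∧ c ≤ '9') → ∀ c ∈ Nat.toDigitsCore 10 f n l, '0' ≤ c ∧ c ≤ '9' := by
  induction f with
  | zero => intro n l hl; simpa [Nat.toDigitsCore] using hl
  | succ f ih =>
    intro n l hl
    have hl' : ∀ c ∈ (n % 10).digitChar :: l, '0' ≤ c ∧ c ≤ '9' := by
      intro c hc
      rcases List.mem_cons.1 hc with rfl | hc
      · exact pv_digitChar_digit _ (Nat.mod_lt _ (by norm_num))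
      · exact hl c hc
    simp only [Nat.toDigitsCore]
    by_cases h0 : n / 10 = 0
    · simpa [h0] using hl'
    · simp only [h0, if_false]
      exact ih (n / 10) ((n % 10).digitChar :: l) hl' 

theorem pv_toDigitsCore_append (f : Nat) : ∀ (n : Nat) (l : List Char),
    Nat.toDigitsCore 10 f n l = Nat.toDigitsCore 10 f n [] ++ l := by
  induction f with
  | zero => intro n l; simp [Nat.toDigitsCore]
  | succ f ih =>
    intro n l
    simp only [Nat.toDigitsCore]
    by_cases h : n / 10 = 0
    · simp [h]
    · simp only [h, if_false]
      rw [ih (n / 10) ((n % 10).digitChar :: l), ih (n / 10) [(n % 10).digitChar]]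
      simp

theorem pv_digitChar_val (d : Nat) (h : d < 10) : (Nat.digitChar d).toNat - 48 = d := by
  interval_cases d <;> decide

theorem pvDec_append_singleton (xs : List Char) (c : Char) :
    pvDec (xs ++ [c]) = 10 * pvDec xs + (c.toNat - 48) := by
  simp [pvDec, List.foldl_append]

theorem pvDec_toDigitsCore (f : Nat) : ∀ (n : Nat), n < f →
    pvDec (Nat.toDigitsCore 10 f n []) = n := by
  induction f with
  | zero => intro n h; omega
  | succ f ih =>
    intro n h
    simp only [Nat.toDigitsCore]
    by_cases h0 : n / 10 = 0
    · have hn : n < 10 := by omega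
      simp [h0, pvDec, pv_digitChar_val (n % 10) (Nat.mod_lt _ (by norm_num))]
      omega
    · simp only [h0, if_false]
      rw [pv_toDigitsCore_append f (n / 10) [(n % 10).digitChar],
        pvDec_append_singleton, ih (n / 10) (by omega),
        pv_digitChar_val (n % 10) (Nat.mod_lt _ (by norm_num))]
      omega

-- completeness: the canonical decimal of a natural parses back to it
theorem pv_toChars_natCast (k : Nat) : PySem.Int.toChars (k : Int) = Nat.toDigits 10 k := by
  simp [PySem.Int.toChars, not_lt.2 (Int.natCast_nonneg k)]

theorem pv_canonical_complete (k : Nat) :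
    pvCanonicalIndex (PySem.Int.toChars (k : Int)) = some (k : Int) := by
  have hdig : ∀ c ∈ Nat.toDigits 10 k, '0' ≤ c ∧ c ≤ '9' :=
    pv_toDigitsCore_digits (k + 1) k [] (by simp)
  have hloop : pvCanonLoop (Nat.toDigits 10 k) ((0 : Nat) : Int)
      = some (((Nat.toDigits 10 k).foldl (fun a c => 10 * a + (c.toNat - 48)) 0 : Nat) : Int) :=
    pv_canonLoop_digits (Nat.toDigits 10 k) 0 hdig
  have hdec : (Nat.toDigits 10 k).foldl (fun a c => 10 * a + (c.toNat - 48)) 0 = k :=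
    pvDec_toDigitsCore (k + 1) k (Nat.lt_succ_self k)
  rw [pv_toChars_natCast]
  simp only [pvCanonicalIndex]
  rw [show ((0:Nat):Int) = (0:Int) from rfl] at hloop
  rw [hloop, hdec]
  simp [pv_toChars_natCast]

-- soundness: a successful parse means the input IS a canonical decimal
theorem pv_canonical_sound {rest : List Char} {v : Int}
    (h : pvCanonicalIndex rest = some v) : 0 ≤ v ∧ PySem.Int.toChars v = rest := by
  unfold pvCanonicalIndex at h
  cases hloop : pvCanonLoop rest 0 with
  | none => rw [hloop] at h; exact absurd h (by simp)
  | some w =>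
    rw [hloop] at h
    change (if PySem.Int.toChars w = rest then some w else none) = some v at h
    split_ifs at h with hc
    · obtain rfl := Option.some.inj h
      exact ⟨pv_canonLoop_nonneg rest 0 w le_rfl hloop, hc⟩

-- membership in pvUsed, characterised
theorem pv_mem_used_foldl (pre : String) : ∀ (cols : List String) (init : PySem.Set Int) (x : Int),
    (x ∈ cols.foldl (fun used col =>
        if PySem.Chars.startswith col.toList pre.toList then
          match pvCanonicalIndex ((PySem.List.slice col.toList (some (PySem.Str.len pre)) none)) with
          | some k => used.add k
          | none => used
        else used) init) ↔
      (x ∈ init ∨ ∃ col ∈ cols, PySem.Chars.startswith col.toList pre.toList = true ∧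
        pvCanonicalIndex (col.toList.drop pre.toList.length) = some x) := by
  intro cols
  induction cols with
  | nil => intro init x; simp
  | cons col cols ih =>
    intro init x
    rw [List.foldl_cons, ih]
    have hslice : PySem.List.slice col.toList (some (PySem.Str.len pre)) none
        = col.toList.drop pre.toList.length := by
      rw [PySem.Str.len_eq, PySem.List.slice_from_natCast]
    constructor
    · rintro (hin | ⟨c, hc, hs, hp⟩)
      · by_cases hsw : PySem.Chars.startswith col.toList pre.toList
        · rw [if_pos hsw, hslice] at hin
          cases hparse : pvCanonicalIndex (col.toList.drop pre.toList.length) with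
          | none => rw [hparse] at hin; exact Or.inl hin
          | some k =>
            rw [hparse] at hin
            rcases (PySem.Set.mem_add init k x).1 hin with hin | rfl
            · exact Or.inl hin
            · exact Or.inr ⟨col, List.mem_cons_self .., hsw, hparse⟩
        · rw [if_neg hsw] at hin; exact Or.inl hin
      · exact Or.inr ⟨c, List.mem_cons_of_mem _ hc, hs, hp⟩
    · have hstep : ∀ init' : PySem.Set Int, x ∈ init' →
          x ∈ (if PySem.Chars.startswith col.toList pre.toList then
            match pvCanonicalIndex ((PySem.List.slice col.toList (some (PySem.Str.len pre)) none)) with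
            | some k => init'.add k
            | none => init'
          else init') := by
        intro init' hin
        split_ifs with hsw
        · cases hparse : pvCanonicalIndex ((PySem.List.slice col.toList (some (PySem.Str.len pre)) none)) with
          | none => simpa using hin
          | some k => exact (PySem.Set.mem_add init' k x).2 (Or.inl hin)
        · exact hin
      rintro (hin | ⟨c, hc, hs, hp⟩)
      · exact Or.inl (hstep init hin)
      · rcases List.mem_cons.1 hc with rfl | hc
        · refine Or.inl ?_
          rw [if_pos hs, hslice, hp]
          exact (PySem.Set.mem_add init x x).2 (Or.inr rfl)
        · exact Or.inr ⟨c, hc, hs, hp⟩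

theorem pv_mem_used_iff (pre : String) (cols : List String) (x : Int) :
    x ∈ pvUsed pre cols ↔
      ∃ col ∈ cols, PySem.Chars.startswith col.toList pre.toList = true ∧
        pvCanonicalIndex (col.toList.drop pre.toList.length) = some x := by
  unfold pvUsed
  rw [pv_mem_used_foldl]
  simp [PySem.Set.empty]

-- the key bridge: index k is used iff the k-th candidate is a column
theorem pv_cand_toList (base : String) (k : Nat) :
    (base ++ "_" ++ PySem.Int.toStr (k : Int)).toList
      = (base ++ "_").toList ++ PySem.Int.toChars (k : Int) := by
  simp [String.toList_append, PySem.Int.toList_toStr]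

theorem pv_used_iff_cand (base : String) (cols : List String) (k : Nat) :
    ((k : Int) ∈ pvUsed (base ++ "_") cols) ↔ (base ++ "_" ++ PySem.Int.toStr (k : Int)) ∈ cols := by
  rw [pv_mem_used_iff]
  constructor
  · rintro ⟨col, hc, hs, hp⟩
    obtain ⟨hnn, hchars⟩ := pv_canonical_sound hp
    obtain ⟨t, ht⟩ := (PySem.Chars.startswith_iff _ _).1 hs
    have hdrop : col.toList.drop (base ++ "_").toList.length = t := by
      rw [← ht, List.drop_left]
    have hcol : col.toList = (base ++ "_" ++ PySem.Int.toStr (k : Int)).toList := by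
      rw [pv_cand_toList, ← ht, hchars, hdrop]
    rwa [String.toList_inj.1 hcol] at hc
  · intro hc
    refine ⟨base ++ "_" ++ PySem.Int.toStr (k : Int), hc, ?_, ?_⟩
    · exact (PySem.Chars.startswith_iff _ _).2 ⟨PySem.Int.toChars (k : Int), (pv_cand_toList base k).symm⟩
    · rw [pv_cand_toList, List.drop_left]
      exact pv_canonical_complete k

-- A's probe loop and B's mex loop walk in lockstep
theorem pv_loops_eq (base : String) (cols : List String) (used : PySem.Set Int)
    (K : ∀ k : Nat, ((k : Int) ∈ used) ↔ (base ++ "_" ++ PySem.Int.toStr (k : Int)) ∈ cols) :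
    ∀ (fuel : Nat) (start : Nat),
      pvALoop base cols (start : Int) fuel
        = (base ++ "_") ++ PySem.Int.toStr (pvMexLoop used (start : Int) fuel) := by
  intro fuel
  induction fuel with
  | zero => intro start; simp [pvALoop, pvMexLoop, String.append_assoc]
  | succ fuel ih =>
    intro start
    simp only [pvALoop, pvMexLoop]
    by_cases hc : (base ++ "_" ++ PySem.Int.toStr (start : Int)) ∈ cols
    · have hm : used.contains ((start : Nat) : Int) = true :=
        (PySem.Set.contains_iff used _).2 ((K start).2 hc)
      rw [if_pos hc, if_pos hm,
        show ((start : Nat) : Int) + 1 = (((start + 1 : Nat)) : Int) by push_cast; ring]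
      exact ih (start + 1)
    · have hm : ¬ (used.contains ((start : Nat) : Int) = true) :=
        fun h => hc ((K start).1 ((PySem.Set.contains_iff used _).1 h))
      rw [if_neg hc, if_neg hm]

-- ===== VERDICT (by name: the statement is the Claim_ definition above) =====
theorem create_new_column_name_spec : Claim_equal_create_new_column_name := by
  intro col_name suffix cols _
  unfold Spec_create_new_column_name
  simp only [create_new_column_name, create_new_column_name_alt]
  by_cases hb : col_name ++ "_" ++ suffix ∈ cols
  · rw [if_pos hb, if_neg (by simpa using hb)]
    exact pv_loops_eq (col_name ++ "_" ++ suffix) cols _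
      (fun k => pv_used_iff_cand (col_name ++ "_" ++ suffix) cols k) (cols.length + 1) 0
  · rw [if_neg hb, if_pos (by simpa using hb)]
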